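-- pv_equiv track=rewrite | github.com/a103262/ATP2024 | tpc7/tpc7.py | maxChuva
-- ===== SOURCE A (Python) =====
-- def maxChuva( tabMeteo):
--     max_prec= tabMeteo[0][3]
--     max_data=tabMeteo[0][0]
--     for data,_,_,precip in tabMeteo[1:]:
--         if max_prec<precip:
--             max_prec=precip
--             max_data=data
--     return (max_data, max_prec)
-- ===== SOURCE B (Python) =====
-- def maxChuva(tabMeteo):
--     row = sorted(tabMeteo, key=lambda r: r[3], reverse=True)[0]
--     return (row[0], row[3])
-- ===== Notes on version B (the rewrite author's own statement) =====
-- stated objective: alternative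
-- what changed: B replaces A's explicit running-maximum loop by a stable descending sort on precipitation and takes the first row; stability with reverse=True preserves A's first-occurrence tie-breaking.
import Mathlib
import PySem

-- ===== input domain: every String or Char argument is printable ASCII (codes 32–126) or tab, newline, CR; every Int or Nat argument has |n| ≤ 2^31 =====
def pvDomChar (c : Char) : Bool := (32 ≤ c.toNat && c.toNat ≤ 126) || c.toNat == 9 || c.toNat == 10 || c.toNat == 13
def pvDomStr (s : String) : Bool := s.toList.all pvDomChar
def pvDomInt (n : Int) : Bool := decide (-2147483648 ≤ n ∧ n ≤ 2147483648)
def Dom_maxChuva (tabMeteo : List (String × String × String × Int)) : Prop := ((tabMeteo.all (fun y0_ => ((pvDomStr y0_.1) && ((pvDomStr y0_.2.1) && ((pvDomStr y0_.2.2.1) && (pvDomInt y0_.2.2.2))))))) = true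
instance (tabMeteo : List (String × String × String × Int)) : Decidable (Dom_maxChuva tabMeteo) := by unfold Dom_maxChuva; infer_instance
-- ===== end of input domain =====

-- B replaces A's running-maximum loop by a stable descending sort on precipitation (index 3)
-- and takes the first row; same first-occurrence tie-breaking, not faster (alternative).

-- ===== PORT A =====
def maxChuva (tabMeteo : List (String × String × String × Int)) : String × Int :=
  (PySem.List.slice tabMeteo (some 1) none).foldl
    (fun st r => if st.2 < r.2.2.2 then (r.1, r.2.2.2) else st)
    ((PySem.List.pyGetD tabMeteo 0 ("", "", "", 0)).1,
     (PySem.List.pyGetD tabMeteo 0 ("", "", "", 0)).2.2.2)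

-- ===== PORT B =====
def maxChuva_alt (tabMeteo : List (String × String × String × Int)) : String × Int :=
  let row := PySem.List.pyGetD
    (PySem.List.sorted tabMeteo (fun r => r.2.2.2) true) 0 ("", "", "", 0)
  (row.1, row.2.2.2)

-- ===== PRECONDITION & SPEC =====
-- Pre_ excludes only the empty table, on which both Pythons raise IndexError.
def Pre_maxChuva (tabMeteo : List (String × String × String × Int)) : Prop := tabMeteo ≠ []
instance (tabMeteo : List (String × String × String × Int)) : Decidable (Pre_maxChuva tabMeteo) := by unfold Pre_maxChuva; infer_instance
def pvWitness_maxChuva : (List (String × String × String × Int)) := [("2020-01-01", "a", "b", 5)]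
def Spec_maxChuva (tabMeteo : List (String × String × String × Int)) (out : String × Int) : Prop := out = maxChuva_alt tabMeteo
instance (tabMeteo : List (String × String × String × Int)) (out : String × Int) : Decidable (Spec_maxChuva tabMeteo out) := by unfold Spec_maxChuva; infer_instance

-- ===== CLAIM (what is proved, stated in full; the proofs are below) =====
def Claim_equal_maxChuva : Prop := ∀ (tabMeteo : List (String × String × String × Int)), Dom_maxChuva tabMeteo → Pre_maxChuva tabMeteo → Spec_maxChuva tabMeteo (maxChuva tabMeteo)

-- ===== LEMMAS AND PROOFS =====

-- Head of the insertion-sort fold is the fold of "keep whichever goes first".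
theorem head?_foldl_insertBy {α : Type} (before : α → α → Bool) :
    ∀ (xs : List α) (h : α) (t : List α),
      (xs.foldl (fun acc x => PySem.List.insertBy before x acc) (h :: t)).head? =
      some (xs.foldl (fun m x => if before x m then x else m) h) := by
  intro xs
  induction xs with
  | nil => intro h t; rfl
  | cons x xs ih =>
    intro h t
    simp only [List.foldl_cons]
    by_cases hb : before x h
    · rw [show PySem.List.insertBy before x (h :: t) = x :: h :: t from by
        simp [PySem.List.insertBy, hb]]
      rw [ih]; simp [hb]
    · rw [show PySem.List.insertBy before x (h :: t) = h :: PySem.List.insertBy before x t from by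
        simp [PySem.List.insertBy, hb]]
      rw [ih]; simp [hb]

-- A's loop state is exactly the (date, precip) projection of the first-occurring max row.
theorem foldA_proj :
    ∀ (xs : List (String × String × String × Int)) (m : String × String × String × Int),
      xs.foldl (fun st r => if st.2 < r.2.2.2 then (r.1, r.2.2.2) else st) (m.1, m.2.2.2) =
      ((xs.foldl (fun m r => if m.2.2.2 < r.2.2.2 then r else m) m).1,
       (xs.foldl (fun m r => if m.2.2.2 < r.2.2.2 then r else m) m).2.2.2) := by
  intro xs
  induction xs with
  | nil => intro m; rfl
  | cons r xs ih =>
    intro m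
    simp only [List.foldl_cons]
    by_cases h : m.2.2.2 < r.2.2.2
    · simp only [h, if_pos]; simpa using ih r
    · simp only [h, if_neg, not_false_iff]; simpa using ih m

-- ===== VERDICT (by name: the statement is the Claim_ definition above) =====
theorem maxChuva_spec : Claim_equal_maxChuva := by
  intro tab _hdom hpre
  obtain ⟨x, rest, rfl⟩ : ∃ x rest, tab = x :: rest := by
    cases tab with
    | nil => exact absurd rfl hpre
    | cons x rest => exact ⟨x, rest, rfl⟩
  show maxChuva (x :: rest) = maxChuva_alt (x :: rest)
  have hsorted : PySem.List.sorted (x :: rest) (fun r => r.2.2.2) true =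
      rest.foldl
        (fun acc r => PySem.List.insertBy (fun a b => decide (b.2.2.2 < a.2.2.2)) r acc)
        [x] := by
    rw [PySem.List.sorted_rev_eq_foldl_insertBy]
    rfl
  have hhead : (PySem.List.sorted (x :: rest) (fun r => r.2.2.2) true).head? =
      some (rest.foldl (fun m r => if m.2.2.2 < r.2.2.2 then r else m) x) := by
    rw [hsorted, head?_foldl_insertBy]
    simp
  obtain ⟨t, ht⟩ := List.head?_eq_some_iff.mp hhead
  unfold maxChuva maxChuva_alt
  rw [ht, PySem.List.slice_from_one]
  simp only [PySem.List.pyGetD_zero_cons, List.tail_cons]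
  exact foldA_proj rest x
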